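-- pv_equiv track=rewrite | github.com/Divinegirl8/Python_Assignment | atm_validation_package/atm_validation_function.py | even_atm_position
-- ===== SOURCE A (Python) =====
-- def even_atm_position(number):
--     single_digit = 0
--     double_digit = 0
--
--     # even position
--
--     for num in range(1, len(number), 2):
--         store = int(number[num])
--         product = store * 2
--
--         if 10 <= product <= 99:
--             two_digit = product
--
--             loop = 0
--             while loop < 2:
--                 out = two_digit // 10 ** loop % 10
--                 loop += 1
--                 double_digit += out
--
--
--         else:
--             single_digit += product
--
--     sum_both = single_digit + double_digit
--     return sum_both
-- ===== SOURCE B (Python) =====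
-- def even_atm_position(number):
--     # Recursive, branchless: consume the string two characters at a time;
--     # each step adds the digit sum of the doubled digit via divmod.
--     if len(number) < 2:
--         return 0
--     q, r = divmod(int(number[1]) * 2, 10)
--     return q + r + even_atm_position(number[2:])
-- ===== Notes on version B (the rewrite author's own statement) =====
-- stated objective: alternative
-- what changed: Replaces A's index loop over range(1,len,2) with two pair accumulators and an inner digit-splitting while-loop by a branchless structural recursion that consumes the string two characters at a time via slicing and adds both divmod components in one expression.
import Mathlib
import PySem

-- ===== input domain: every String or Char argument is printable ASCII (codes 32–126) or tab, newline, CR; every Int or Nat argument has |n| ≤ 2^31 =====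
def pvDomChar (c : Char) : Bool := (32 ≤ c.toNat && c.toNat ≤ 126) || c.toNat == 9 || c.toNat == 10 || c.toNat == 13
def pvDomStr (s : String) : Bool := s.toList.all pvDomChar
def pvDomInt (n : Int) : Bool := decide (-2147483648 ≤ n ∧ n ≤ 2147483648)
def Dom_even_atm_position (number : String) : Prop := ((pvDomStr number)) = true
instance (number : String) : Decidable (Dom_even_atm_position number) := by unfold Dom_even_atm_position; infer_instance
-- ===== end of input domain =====

-- B replaces A's index loop (pair of accumulators, inner digit-splitting while-loop)
-- by a branchless structural recursion consuming the string two characters at a time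
-- via slicing, adding both divmod components of the doubled digit at each step.


-- ===== PORT A =====
-- inner 'while loop < 2' of A; 10 ** loop ported as (10:Int) ^ loop.toNat (exact here: loop is 0 or 1)
def innerWhileA (two_digit : Int) (loop : Int) (double_digit : Int) : Int :=
  if loop < 2 then
    innerWhileA two_digit (loop + 1)
      (double_digit + PySem.Int.mod (PySem.Int.floordiv two_digit ((10:Int) ^ loop.toNat)) 10)
  else double_digit
termination_by (2 - loop).toNat
decreasing_by omega

-- int(number[num]) ported via pyGet? + ofChars?; the .getD 0 default is only reached outside Pre_
def even_atm_position (number : String) : Int :=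
  let cs := number.toList
  let st := (PySem.List.pyRange 1 (PySem.List.len cs) 2).foldl
    (fun (st : Int × Int) num =>
      let store := (PySem.Int.ofChars?
        ((PySem.List.pyGet? cs num).elim ([] : List Char) (fun c => [c]))).getD 0
      let product := store * 2
      if 10 ≤ product ∧ product ≤ 99 then (st.1, innerWhileA product 0 st.2)
      else (st.1 + product, st.2)) (0, 0)
  st.1 + st.2

-- ===== PORT B =====
-- B's recursion, on the string's character list; number[1] via pyGet?, number[2:] via slice,
-- divmod via PySem.Int.divmod? (the .getD defaults are only reached outside Pre_ / never: 10 ≠ 0)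
def altGo (cs : List Char) : Int :=
  if PySem.List.len cs < 2 then 0
  else
    let qr := (PySem.Int.divmod?
      (((PySem.Int.ofChars?
        ((PySem.List.pyGet? cs 1).elim ([] : List Char) (fun c => [c]))).getD 0) * 2) 10).getD (0, 0)
    qr.1 + qr.2 + altGo (PySem.List.slice cs (some 2) none)
termination_by cs.length
decreasing_by
  rw [PySem.List.slice_from cs (by norm_num : (0:Int) ≤ 2)]
  simp only [List.length_drop]
  simp only [PySem.List.len, not_lt] at *
  omega

def even_atm_position_alt (number : String) : Int := altGo number.toList

-- ===== PRECONDITION & SPEC =====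
-- Pre_ excludes exactly the inputs on which Python A raises ValueError: a non-digit
-- character at an odd (0-based) position, where int() fails.
def Pre_even_atm_position (number : String) : Prop :=
  ∀ p ∈ number.toList.zipIdx, p.2 % 2 = 1 → p.1.isDigit = true
instance (number : String) : Decidable (Pre_even_atm_position number) := by
  unfold Pre_even_atm_position; infer_instance
def pvWitness_even_atm_position : String := "4539148803436467"

def Spec_even_atm_position (number : String) (out : Int) : Prop := out = even_atm_position_alt number
instance (number : String) (out : Int) : Decidable (Spec_even_atm_position number out) := by unfold Spec_even_atm_position; infer_instance

-- ===== CLAIM (what is proved, stated in full; the proofs are below) =====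
def Claim_equal_even_atm_position : Prop := ∀ (number : String), Dom_even_atm_position number → Pre_even_atm_position number → Spec_even_atm_position number (even_atm_position number)

-- ===== LEMMAS AND PROOFS =====

lemma digit_cases (c : Char) (h : c.isDigit = true) :
    c = '0' ∨ c = '1' ∨ c = '2' ∨ c = '3' ∨ c = '4' ∨ c = '5' ∨ c = '6' ∨ c = '7' ∨ c = '8' ∨ c = '9' := by
  have hb : 48 ≤ c.toNat ∧ c.toNat ≤ 57 := by
    simp only [Char.isDigit, ge_iff_le, Bool.and_eq_true, decide_eq_true_eq,
      UInt32.le_iff_toNat_le] at h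
    exact ⟨h.1, h.2⟩
  have hc : ∀ {d : Char}, c.toNat = d.toNat → c = d := by
    intro d hd
    exact Char.ext (UInt32.toNat_inj.mp hd)
  have hv : c.toNat = 48 ∨ c.toNat = 49 ∨ c.toNat = 50 ∨ c.toNat = 51 ∨ c.toNat = 52 ∨
      c.toNat = 53 ∨ c.toNat = 54 ∨ c.toNat = 55 ∨ c.toNat = 56 ∨ c.toNat = 57 := by omega
  rcases hv with h'|h'|h'|h'|h'|h'|h'|h'|h'|h'
  · simp [hc (d := '0') h']
  · simp [hc (d := '1') h']
  · simp [hc (d := '2') h']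
  · simp [hc (d := '3') h']
  · simp [hc (d := '4') h']
  · simp [hc (d := '5') h']
  · simp [hc (d := '6') h']
  · simp [hc (d := '7') h']
  · simp [hc (d := '8') h']
  · simp [hc (d := '9') h']

lemma store_bounds (c : Char) (h : c.isDigit = true) :
    0 ≤ (PySem.Int.ofChars? [c]).getD 0 ∧ (PySem.Int.ofChars? [c]).getD 0 ≤ 9 := by
  rcases digit_cases c h with rfl|rfl|rfl|rfl|rfl|rfl|rfl|rfl|rfl|rfl <;> decide

lemma innerWhileA_eval (p d : Int) :
    innerWhileA p 0 d =
      d + PySem.Int.mod (PySem.Int.floordiv p 1) 10 + PySem.Int.mod (PySem.Int.floordiv p 10) 10 := by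
  rw [innerWhileA]; norm_num
  rw [innerWhileA]; norm_num
  rw [innerWhileA]; norm_num

-- one step of A's loop body (projected to the final sum) equals the divmod digit sum, for 0 ≤ v ≤ 9
lemma core (v s d : Int) (h0 : 0 ≤ v) (h9 : v ≤ 9) :
    (if 10 ≤ v*2 ∧ v*2 ≤ 99 then s + innerWhileA (v*2) 0 d else (s + v*2) + d)
  = s + d + (PySem.Int.floordiv (v*2) 10 + PySem.Int.mod (v*2) 10) := by
  rw [innerWhileA_eval]
  simp only [PySem.Int.mod, PySem.Int.floordiv, Int.fmod_eq_emod, Int.fdiv_eq_ediv]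
  split_ifs <;> omega

-- A's pair-state fold collapses to a single fold adding the divmod digit sums
lemma fold_pair (cs : List Char) (l : List Int)
    (hdig : ∀ i ∈ l, ∀ c, PySem.List.pyGet? cs i = some c → c.isDigit = true) :
    ∀ s d : Int,
      ((l.foldl
        (fun (st : Int × Int) num =>
          let store := (PySem.Int.ofChars?
            ((PySem.List.pyGet? cs num).elim ([] : List Char) (fun c => [c]))).getD 0
          let product := store * 2
          if 10 ≤ product ∧ product ≤ 99 then (st.1, innerWhileA product 0 st.2)
          else (st.1 + product, st.2)) (s, d)).1 +
       (l.foldl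
        (fun (st : Int × Int) num =>
          let store := (PySem.Int.ofChars?
            ((PySem.List.pyGet? cs num).elim ([] : List Char) (fun c => [c]))).getD 0
          let product := store * 2
          if 10 ≤ product ∧ product ≤ 99 then (st.1, innerWhileA product 0 st.2)
          else (st.1 + product, st.2)) (s, d)).2) =
      l.foldl
        (fun (total : Int) num =>
          let p := ((PySem.Int.ofChars?
            ((PySem.List.pyGet? cs num).elim ([] : List Char) (fun c => [c]))).getD 0) * 2
          total + (PySem.Int.floordiv p 10 + PySem.Int.mod p 10)) (s + d) := by
  induction l with
  | nil => intro s d; simp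
  | cons i l ih =>
    intro s d
    have hb : 0 ≤ (PySem.Int.ofChars?
          ((PySem.List.pyGet? cs i).elim ([] : List Char) (fun c => [c]))).getD 0 ∧
        (PySem.Int.ofChars?
          ((PySem.List.pyGet? cs i).elim ([] : List Char) (fun c => [c]))).getD 0 ≤ 9 := by
      cases hg : PySem.List.pyGet? cs i with
      | none => decide
      | some c =>
        have := hdig i (by simp) c hg
        simpa [hg] using store_bounds c this
    have hdig' : ∀ j ∈ l, ∀ c, PySem.List.pyGet? cs j = some c → c.isDigit = true := by
      intro j hj c hc; exact hdig j (by simp [hj]) c hc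
    set v := (PySem.Int.ofChars?
      ((PySem.List.pyGet? cs i).elim ([] : List Char) (fun c => [c]))).getD 0 with hv
    simp only [List.foldl_cons]
    by_cases hcond : 10 ≤ v*2 ∧ v*2 ≤ 99
    · rw [if_pos hcond]
      rw [ih hdig' s (innerWhileA (v*2) 0 d)]
      congr 1
      have := core v s d hb.1 hb.2
      rw [if_pos hcond] at this
      exact this
    · rw [if_neg hcond]
      rw [ih hdig' (s + v*2) d]
      congr 1
      have := core v s d hb.1 hb.2
      rw [if_neg hcond] at this
      exact this

-- range(1, n, 2) peels its head and shifts the tail by 2, for n ≥ 2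
lemma pyRange_two_step (n : Int) (h : 2 ≤ n) :
    PySem.List.pyRange 1 n 2 = 1 :: (PySem.List.pyRange 1 (n - 2) 2).map (· + 2) := by
  rw [PySem.List.pyRange_of_pos 1 n (by norm_num),
      PySem.List.pyRange_of_pos 1 (n - 2) (by norm_num)]
  by_cases h4 : 4 ≤ n
  · rw [if_pos (by omega), if_pos (by omega)]
    have hm : ((n - 1 + 2 - 1) / 2).toNat = ((n - 2 - 1 + 2 - 1) / 2).toNat + 1 := by omega
    rw [hm, List.range_succ_eq_map]
    simp only [List.map_cons, List.map_map]
    constructor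
  · rw [if_pos (by omega), if_neg (by omega)]
    have hm : ((n - 1 + 2 - 1) / 2).toNat = 1 := by omega
    rw [hm]
    decide

-- indexing past the first two characters is indexing the dropped tail
lemma pyGet?_shift (a b : Char) (rest : List Char) (i : Int) (hi : 0 ≤ i) :
    PySem.List.pyGet? (a :: b :: rest) (i + 2) = PySem.List.pyGet? rest i := by
  rw [PySem.List.pyGet?_of_nonneg _ (by omega), PySem.List.pyGet?_of_nonneg _ hi]
  have : (i + 2).toNat = i.toNat + 2 := by omega
  simp [this]

-- the single fold over range(1, len, 2) is B's structural recursion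
lemma fold_to_rec (cs : List Char) :
    ∀ t : Int,
      (PySem.List.pyRange 1 (PySem.List.len cs) 2).foldl
        (fun (total : Int) num =>
          let p := ((PySem.Int.ofChars?
            ((PySem.List.pyGet? cs num).elim ([] : List Char) (fun c => [c]))).getD 0) * 2
          total + (PySem.Int.floordiv p 10 + PySem.Int.mod p 10)) t = t + altGo cs := by
  induction cs using altGo.induct with
  | case1 cs hlt =>
    intro t
    rw [altGo, if_pos hlt]
    have hr : PySem.List.pyRange 1 (PySem.List.len cs) 2 = [] := by
      rw [PySem.List.pyRange_of_pos 1 _ (by norm_num), if_neg (by omega)]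
      simp
    rw [hr]
    simp
  | case2 cs hlt ih =>
    intro t
    rw [altGo, if_neg hlt]
    simp only [PySem.List.len, not_lt] at hlt
    match cs, hlt with
    | a :: b :: rest, _ =>
      have hlen : PySem.List.len (a :: b :: rest) = (rest.length : Int) + 2 := by
        simp [PySem.List.len]; omega
      rw [pyRange_two_step _ (by omega)]
      simp only [List.foldl_cons, List.foldl_map]
      have hshift : ∀ init : Int,
          (PySem.List.pyRange 1 (PySem.List.len (a :: b :: rest) - 2) 2).foldl
            (fun (total : Int) num =>
              let p := ((PySem.Int.ofChars?
                ((PySem.List.pyGet? (a :: b :: rest) (num + 2)).elim ([] : List Char)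
                  (fun c => [c]))).getD 0) * 2
              total + (PySem.Int.floordiv p 10 + PySem.Int.mod p 10)) init =
          (PySem.List.pyRange 1 (PySem.List.len rest) 2).foldl
            (fun (total : Int) num =>
              let p := ((PySem.Int.ofChars?
                ((PySem.List.pyGet? rest num).elim ([] : List Char)
                  (fun c => [c]))).getD 0) * 2
              total + (PySem.Int.floordiv p 10 + PySem.Int.mod p 10)) init := by
        intro init
        have hlen2 : PySem.List.len (a :: b :: rest) - 2 = PySem.List.len rest := by
          simp [PySem.List.len]
          omega
        rw [hlen2]
        apply PySem.List.foldl_congr_mem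
        intro acc x hx
        have hx1 : 1 ≤ x := ((PySem.List.mem_pyRange_iff_of_pos (by norm_num) x).mp hx).1
        simp only
        rw [pyGet?_shift a b rest x (by omega)]
      rw [hshift _]
      have hslice : PySem.List.slice (a :: b :: rest) (some 2) none = rest := by
        rw [PySem.List.slice_from _ (by norm_num : (0:Int) ≤ 2)]
        rfl
      rw [hslice] at ih
      rw [hslice, ih _]
      simp only [PySem.Int.divmod?, PySem.Int.floordiv, PySem.Int.mod,
        Int.fmod_eq_emod, Int.fdiv_eq_ediv]
      norm_num
      ring

-- ===== VERDICT (by name: the statement is the Claim_ definition above) =====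
theorem even_atm_position_spec : Claim_equal_even_atm_position := by
  intro number _ hpre
  unfold Spec_even_atm_position even_atm_position even_atm_position_alt
  have hdig : ∀ i ∈ PySem.List.pyRange 1 (PySem.List.len number.toList) 2,
      ∀ c, PySem.List.pyGet? number.toList i = some c → c.isDigit = true := by
    intro i hi c hc
    have hmem := (PySem.List.mem_pyRange_iff_of_pos (by norm_num : (0:Int) < 2) i).mp hi
    have h1 : 1 ≤ i := hmem.1
    have hdvd : (2:Int) ∣ i - 1 := hmem.2.2
    have hodd : i.toNat % 2 = 1 := by omega
    have hget : number.toList[i.toNat]? = some c := by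
      rw [PySem.List.pyGet?_of_nonneg number.toList (i := i) (by omega)] at hc
      exact hc
    have hz : (c, i.toNat) ∈ number.toList.zipIdx :=
      List.mk_mem_zipIdx_iff_getElem?.mpr hget
    exact hpre (c, i.toNat) hz hodd
  have h1 := fold_pair number.toList (PySem.List.pyRange 1 (PySem.List.len number.toList) 2) hdig 0 0
  have h2 := fold_to_rec number.toList 0
  simp only [zero_add] at h1 h2
  simpa using h1.trans h2
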